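-- pv_equiv track=rewrite | github.com/jgmcfilho/uri-codes-python | 1110.py | perform_op
-- ===== SOURCE A (Python) =====
-- def perform_op(cards):
--     discarded = []
--     while len(cards) > 0:
--         if len(cards) == 1:
--             last = cards.pop()
--             continue
--         discarded.append(cards.pop(0))
--         cards += [cards.pop(0)]
--     # Returning a tuple
--     return ', '.join([str(card) for card in discarded]), last
-- ===== SOURCE B (Python) =====
-- def perform_op(cards):
--     # Round-based simulation: sweep the whole list once per round, with a
--     # discard/keep flag whose parity persists across rounds.
--     discarded = []
--     action = True
--     while len(cards) > 1:
--         kept = []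
--         for c in cards:
--             if action:
--                 discarded.append(c)
--             else:
--                 kept.append(c)
--             action = not action
--         cards[:] = kept
--     if len(cards) == 1:
--         last = cards.pop()
--     return ', '.join(str(c) for c in discarded), last
-- ===== Notes on version B (the rewrite author's own statement) =====
-- stated objective: faster
-- what changed: Replaces A's one-card-at-a-time queue rotation (pop(0)/append per element) with a round-based sweep: each pass splits the list into discarded and kept elements by a toggling flag whose parity carries across rounds.
import Mathlib
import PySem

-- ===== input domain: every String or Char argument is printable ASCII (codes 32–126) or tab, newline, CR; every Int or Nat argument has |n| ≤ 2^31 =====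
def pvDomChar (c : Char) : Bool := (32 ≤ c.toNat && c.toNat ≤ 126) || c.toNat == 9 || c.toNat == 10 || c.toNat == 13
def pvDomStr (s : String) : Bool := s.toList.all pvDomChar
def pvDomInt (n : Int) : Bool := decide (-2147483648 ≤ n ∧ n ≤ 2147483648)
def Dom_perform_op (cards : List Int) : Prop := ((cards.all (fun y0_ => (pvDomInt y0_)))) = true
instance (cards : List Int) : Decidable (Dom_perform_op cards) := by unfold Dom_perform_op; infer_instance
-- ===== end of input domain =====

-- B re-implements A's one-at-a-time queue rotation as a round-based sweep with a
-- persistent discard/keep flag; equivalence is about the RETURN value only (both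
-- Pythons empty `cards` in place).

-- ===== PORT A =====
-- A's while loop: each iteration either takes the lone survivor or discards the
-- front card and rotates the next to the back.  Fuel = list length (each
-- iteration shortens the queue by exactly one, so length fuel is exact).
def pvAq : Nat → List Int → List Int → List Int × Option Int
  | 0, _, disc => (disc, none)
  | _ + 1, [], disc => (disc, none)
  | _ + 1, [x], disc => (disc, some x)
  | n + 1, a :: b :: t, disc => pvAq n (t ++ [b]) (disc ++ [a])

def perform_op (cards : List Int) : String × Int :=
  let r := pvAq cards.length cards []
  (PySem.Str.join ", " (r.1.map PySem.Int.toStr), (r.2).getD 0)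

-- ===== PORT B =====
-- one `for c in cards` sweep: returns (discarded-this-round, kept, final flag)
def pvSweep : Bool → List Int → List Int × List Int × Bool
  | f, [] => ([], [], f)
  | f, c :: t =>
      let r := pvSweep (!f) t
      if f then (c :: r.1, r.2.1, r.2.2) else (r.1, c :: r.2.1, r.2.2)

-- B's while loop over rounds; fuel = list length (each round with ≥ 2 cards discards at least one)
def pvRounds : Nat → Bool → List Int → List Int → List Int × Option Int
  | 0, _, q, disc => (disc, q.head?)
  | n + 1, f, q, disc =>
      if q.length ≤ 1 then (disc, q.head?)
      else
        let r := pvSweep f q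
        pvRounds n r.2.2 r.2.1 (disc ++ r.1)

def perform_op_alt (cards : List Int) : String × Int :=
  let r := pvRounds cards.length true cards []
  (PySem.Str.join ", " (r.1.map PySem.Int.toStr), (r.2).getD 0)

-- ===== PRECONDITION & SPEC =====
-- On the empty list both Pythons raise UnboundLocalError (`last` never assigned); excluded.
def Pre_perform_op (cards : List Int) : Prop := cards ≠ []
instance (cards : List Int) : Decidable (Pre_perform_op cards) := by unfold Pre_perform_op; infer_instance
def pvWitness_perform_op : List Int := [1, 2, 3, 4, 5]

def Spec_perform_op (cards : List Int) (out : String × Int) : Prop := out = perform_op_alt cards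
instance (cards : List Int) (out : String × Int) : Decidable (Spec_perform_op cards out) := by unfold Spec_perform_op; infer_instance

-- ===== CLAIM (what is proved, stated in full; the proofs are below) =====
def Claim_equal_perform_op : Prop := ∀ (cards : List Int), Dom_perform_op cards → Pre_perform_op cards → Spec_perform_op cards (perform_op cards)

-- ===== LEMMAS AND PROOFS =====

-- `rot f q`: the A-side queue corresponding to a B-side round list q with flag f
-- (flag = false means A has already rotated the head to the back).
def pvRot (f : Bool) (q : List Int) : List Int :=
  if f then q else match q with | [] => [] | c :: t => t ++ [c]

-- fuel irrelevance for pvAq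
theorem pvAq_fuel : ∀ (n m : Nat) (q disc : List Int),
    q.length ≤ n → q.length ≤ m → pvAq n q disc = pvAq m q disc := by
  intro n
  induction n with
  | zero =>
    intro m q disc hn _
    have : q = [] := List.eq_nil_of_length_eq_zero (Nat.le_zero.mp hn)
    subst this
    cases m <;> simp [pvAq]
  | succ n ih =>
    intro m q disc hn hm
    match q, m with
    | [], m => cases m <;> simp [pvAq]
    | [x], m =>
      cases m with
      | zero => simp at hm
      | succ m => simp [pvAq]
    | a :: b :: t, m =>
      cases m with
      | zero => simp at hm
      | succ m =>
        simp only [pvAq]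
        apply ih
        · simpa using Nat.succ_le_succ_iff.mp (by simpa using hn)
        · simpa using Nat.succ_le_succ_iff.mp (by simpa using hm)

-- pvAq with exact fuel, the canonical form
def pvA (q disc : List Int) : List Int × Option Int := pvAq q.length q disc

theorem pvA_nil (disc : List Int) : pvA [] disc = (disc, none) := by simp [pvA, pvAq]
theorem pvA_one (x : Int) (disc : List Int) : pvA [x] disc = (disc, some x) := by simp [pvA, pvAq]
theorem pvA_step (a b : Int) (t disc : List Int) :
    pvA (a :: b :: t) disc = pvA (t ++ [b]) (disc ++ [a]) := by
  simp only [pvA, List.length_cons, pvAq]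
  apply pvAq_fuel <;> simp

theorem pvSweep_len : ∀ (f : Bool) (q : List Int),
    (pvSweep f q).1.length + (pvSweep f q).2.1.length = q.length := by
  intro f q
  induction q generalizing f with
  | nil => simp [pvSweep]
  | cons c t ih =>
    have h1 := ih true
    have h2 := ih false
    cases f <;> simp [pvSweep] <;> omega

theorem pvSweep_kept_lt (f : Bool) (q : List Int) (h : 2 ≤ q.length) :
    (pvSweep f q).2.1.length < q.length := by
  match q, h with
  | a :: b :: t, _ =>
    have h1 := pvSweep_len f (a :: b :: t)
    -- the discarded part is nonempty: either a (f = true) or b (f = false) is discarded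
    have hd : 1 ≤ (pvSweep f (a :: b :: t)).1.length := by
      cases f <;> simp [pvSweep]
    omega

-- fuel irrelevance for pvRounds
theorem pvRounds_fuel : ∀ (n m : Nat) (f : Bool) (q disc : List Int),
    q.length ≤ n → q.length ≤ m → pvRounds n f q disc = pvRounds m f q disc := by
  intro n
  induction n with
  | zero =>
    intro m f q disc hn _
    have : q = [] := List.eq_nil_of_length_eq_zero (Nat.le_zero.mp hn)
    subst this
    cases m <;> simp [pvRounds]
  | succ n ih =>
    intro m f q disc hn hm
    cases m with
    | zero =>
      have : q = [] := List.eq_nil_of_length_eq_zero (Nat.le_zero.mp hm)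
      subst this; simp [pvRounds]
    | succ m =>
      simp only [pvRounds]
      split
      · rfl
      · rename_i hq
        push Not at hq
        have hk := pvSweep_kept_lt f q hq
        exact ih m _ _ _ (by omega) (by omega)

def pvR (f : Bool) (q disc : List Int) : List Int × Option Int := pvRounds q.length f q disc

theorem pvR_base (f : Bool) (q disc : List Int) (h : q.length ≤ 1) :
    pvR f q disc = (disc, q.head?) := by
  unfold pvR
  cases q with
  | nil => simp [pvRounds]
  | cons a t => simp at h; simp [pvRounds, h]

theorem pvR_step (f : Bool) (q disc : List Int) (h : 2 ≤ q.length) :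
    pvR f q disc = pvR (pvSweep f q).2.2 (pvSweep f q).2.1 (disc ++ (pvSweep f q).1) := by
  unfold pvR
  match q, h with
  | a :: b :: t, _ =>
    simp only [pvRounds, List.length_cons]
    have hk := pvSweep_kept_lt f (a :: b :: t) (by simp)
    rw [if_neg (by simp)]
    exact pvRounds_fuel _ _ _ _ _ (by simp at hk ⊢; omega) (le_refl _)

-- THE ROUND INVARIANT: sweeping `pending` (flag true) with round-kept accumulator κ
-- matches A run from queue `pending ++ κ`, provided the lone-pending case has κ ≠ [].
theorem pvG : ∀ (pending κ disc : List Int),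
    (∀ a, pending = [a] → κ ≠ []) →
    pvA (pending ++ κ) disc
      = pvA (pvRot (pvSweep true pending).2.2 (κ ++ (pvSweep true pending).2.1))
            (disc ++ (pvSweep true pending).1)
  | [], κ, disc, _ => by simp [pvSweep, pvRot]
  | [a], κ, disc, h => by
    have hκ : κ ≠ [] := h a rfl
    match κ, hκ with
    | c :: κ', _ =>
      simp only [pvSweep, List.cons_append, List.nil_append]
      rw [pvA_step a c κ' disc]
      simp [pvRot]
  | a :: b :: t, κ, disc, _ => by
    have ih := pvG t (κ ++ [b]) (disc ++ [a]) (by intro x _; simp)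
    simp only [pvSweep, List.cons_append]
    rw [pvA_step a b (t ++ κ) disc, List.append_assoc t]
    simp only [Bool.not_true, Bool.not_false] at ih ⊢
    rw [ih]
    simp [List.append_assoc]

-- one B round = the corresponding stretch of A steps
theorem pvRoundLemma (f : Bool) (q disc : List Int) (h : 2 ≤ q.length) :
    pvA (pvRot f q) disc
      = pvA (pvRot (pvSweep f q).2.2 (pvSweep f q).2.1) (disc ++ (pvSweep f q).1) := by
  cases f with
  | true =>
    have := pvG q [] disc (by intro a ha; subst ha; simp at h)
    simpa [pvRot] using this
  | false =>
    cases q with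
    | nil => simp at h
    | cons c t =>
      have hg := pvG t [c] disc (by intro a _; simp)
      simp only [pvSweep, Bool.not_false]
      simp only [pvRot, if_neg (Bool.false_ne_true)]
      rw [hg]
      cases (pvSweep true t).2.2 <;> simp [pvRot]

-- main simulation: B's rounds from (f, q) equal A from the rotated queue
theorem pvMain : ∀ (n : Nat) (f : Bool) (q disc : List Int), q.length ≤ n →
    pvR f q disc = pvA (pvRot f q) disc := by
  intro n
  induction n with
  | zero =>
    intro f q disc h
    have : q = [] := List.eq_nil_of_length_eq_zero (Nat.le_zero.mp h)
    subst this
    simp [pvR_base f [] disc (by simp), pvRot, pvA_nil]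
  | succ n ih =>
    intro f q disc h
    by_cases hq : q.length ≤ 1
    · rw [pvR_base f q disc hq]
      match q, hq with
      | [], _ => simp [pvRot, pvA_nil]
      | [x], _ => cases f <;> simp [pvRot, pvA_one]
    · push Not at hq
      rw [pvR_step f q disc hq, pvRoundLemma f q disc hq]
      exact ih _ _ _ (by have := pvSweep_kept_lt f q hq; omega)

-- ===== VERDICT (by name: the statement is the Claim_ definition above) =====
theorem perform_op_spec : Claim_equal_perform_op := by
  intro cards _ _
  unfold Spec_perform_op perform_op perform_op_alt
  have : pvRounds cards.length true cards [] = pvAq cards.length cards [] := by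
    have := pvMain cards.length true cards [] (le_refl _)
    simpa [pvR, pvA, pvRot] using this
  rw [this]
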